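-- pv_equiv track=rewrite | github.com/khyahahati/pdf-research-tool | extract_income_statement.py | filter_income_statement_block
-- ===== SOURCE A (Python) =====
-- def filter_income_statement_block(data_dict):
--     keys = list(data_dict.keys())
--
--     start_index = None
--     end_index = None
--
--     for i, key in enumerate(keys):
--         key_lower = key.lower()
--
--         # Start at first true revenue line
--         if "revenue from operations" in key_lower or "(a) revenue" in key_lower:
--             if start_index is None:
--                 start_index = i
--
--         # Stop at total comprehensive income
--         if "total comprehensive income" in key_lower:
--             end_index = i
--             break
--
--     if start_index is not None and end_index is not None:
--         filtered_keys = keys[start_index:end_index + 1]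
--         return {k: data_dict[k] for k in filtered_keys}
--
--     return data_dict
-- ===== SOURCE B (Python) =====
-- def filter_income_statement_block(data_dict):
--     # Single streaming pass over the items with an accumulator: start collecting
--     # (key, value) pairs at the first revenue line, return the collected block at
--     # the first "total comprehensive income" line; no indices, no slicing, no
--     # second lookup pass.
--     block = None  # None = block not started yet
--     for k, v in data_dict.items():
--         kl = k.lower()
--         if block is None and ("revenue from operations" in kl or "(a) revenue" in kl):
--             block = []
--         if block is not None:
--             block.append((k, v))
--         if "total comprehensive income" in kl:
--             return dict(block) if block is not None else data_dict
--     return data_dict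
-- ===== Notes on version B (the rewrite author's own statement) =====
-- stated objective: alternative
-- what changed: A scans for start/end indices, then slices the key list and rebuilds the block with a dict-comprehension lookup pass; B is a single streaming pass over the (key, value) items with an accumulator that starts collecting pairs at the first revenue line and returns the collected block at the first total-comprehensive-income line - no indices, no slicing, no lookup.
import Mathlib
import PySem

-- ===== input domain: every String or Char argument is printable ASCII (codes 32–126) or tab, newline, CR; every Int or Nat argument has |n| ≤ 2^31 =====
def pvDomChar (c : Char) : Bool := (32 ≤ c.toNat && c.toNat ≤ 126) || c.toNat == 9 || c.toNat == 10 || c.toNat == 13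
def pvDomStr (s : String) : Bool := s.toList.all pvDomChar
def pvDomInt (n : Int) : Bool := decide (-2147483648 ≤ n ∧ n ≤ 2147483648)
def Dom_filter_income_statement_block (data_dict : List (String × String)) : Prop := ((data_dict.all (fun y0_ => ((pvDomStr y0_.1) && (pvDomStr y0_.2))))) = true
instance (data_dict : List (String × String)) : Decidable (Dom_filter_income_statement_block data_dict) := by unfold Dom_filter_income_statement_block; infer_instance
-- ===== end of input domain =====

-- B replaces A's index scan + key slice + dict-comprehension lookup by one streaming pass
-- over the (key, value) items with an accumulator; objective: alternative. Return-value
-- equivalence; neither version mutates.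

-- Shared literal substring tests (the exact conditions of both Pythons)
def pvIsRev (k : String) : Bool :=
  PySem.Str.isIn "revenue from operations" (PySem.Str.lower k) ||
  PySem.Str.isIn "(a) revenue" (PySem.Str.lower k)

def pvIsTotal (k : String) : Bool :=
  PySem.Str.isIn "total comprehensive income" (PySem.Str.lower k)

-- ===== PORT A =====
-- dict lookup data_dict[k] (first binding of k; Python dict keys are unique)
def pvLookup (data_dict : List (String × String)) (k : String) : String :=
  (PySem.Dict.mk data_dict).getD k ""

-- A's single for-loop with enumerate, running start/end state and break
def scanA : List String → Nat → Option Nat → Option Nat × Option Nat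
  | [], _, s => (s, none)
  | k :: rest, i, s =>
    let s' := if pvIsRev k then (match s with | none => some i | some _ => s) else s
    if pvIsTotal k then (s', some i)
    else scanA rest (i + 1) s'

def filter_income_statement_block (data_dict : List (String × String)) : List (String × String) :=
  let keys := data_dict.map Prod.fst
  match scanA keys 0 none with
  | (some s, some e) =>
      -- keys[start:end+1]: here 0 ≤ s ≤ e < keys.length, so the slice is drop/take
      ((keys.drop s).take (e + 1 - s)).map (fun k => (k, pvLookup data_dict k))
  | _ => data_dict

-- ===== PORT B =====
-- B's streaming loop: 'block' is None until the first revenue line, then the list of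
-- collected (key, value) pairs; the first total line returns the block (or the input)
def goB (orig : List (String × String)) :
    List (String × String) → Option (List (String × String)) → List (String × String)
  | [], _ => orig
  | (k, v) :: rest, block =>
    let block1 := if block.isNone && pvIsRev k then some [] else block
    let block2 := block1.map (· ++ [(k, v)])
    if pvIsTotal k then (match block2 with | some b => b | none => orig)
    else goB orig rest block2

def filter_income_statement_block_alt (data_dict : List (String × String)) : List (String × String) :=
  goB data_dict data_dict none

-- ===== PRECONDITION & SPEC =====
-- Pre_ excludes association lists with duplicate keys: they cannot arise from a Python
-- dict (the function's actual argument type), so the ports' values there are artefacts.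
def Pre_filter_income_statement_block (data_dict : List (String × String)) : Prop :=
  (data_dict.map Prod.fst).Nodup
instance (data_dict : List (String × String)) : Decidable (Pre_filter_income_statement_block data_dict) := by unfold Pre_filter_income_statement_block; infer_instance

def pvWitness_filter_income_statement_block : (List (String × String)) :=
  [("(a) Revenue", "10"), ("expenses", "4"), ("Total comprehensive income", "6")]

def Spec_filter_income_statement_block (data_dict : List (String × String)) (out : List (String × String)) : Prop := out = filter_income_statement_block_alt data_dict
instance (data_dict : List (String × String)) (out : List (String × String)) : Decidable (Spec_filter_income_statement_block data_dict out) := by unfold Spec_filter_income_statement_block; infer_instance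

-- ===== CLAIM (what is proved, stated in full; the proofs are below) =====
def Claim_equal_filter_income_statement_block : Prop := ∀ (data_dict : List (String × String)), Dom_filter_income_statement_block data_dict → Pre_filter_income_statement_block data_dict → Spec_filter_income_statement_block data_dict (filter_income_statement_block data_dict)

-- ===== LEMMAS AND PROOFS =====

-- Proof-only characterisations of both loops via first-match indices
def findTotal : List String → Option Nat
  | [] => none
  | k :: rest => if pvIsTotal k then some 0 else (findTotal rest).map (· + 1)

def findRev : List String → Option Nat
  | [] => none
  | k :: rest => if pvIsRev k then some 0 else (findRev rest).map (· + 1)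

-- A's combined scan, characterised by the two first-match indices
theorem scanA_eq (ks : List String) : ∀ (i : Nat) (s : Option Nat),
    scanA ks i s =
      match findTotal ks with
      | none => (s.or ((findRev ks).map (· + i)), none)
      | some e => (s.or ((findRev (ks.take (e + 1))).map (· + i)), some (e + i)) := by
  induction ks with
  | nil => intro i s; simp [scanA, findTotal, findRev]
  | cons k rest ih =>
    intro i s
    by_cases ht : pvIsTotal k
    · by_cases hr : pvIsRev k <;> cases s <;>
        simp [scanA, findTotal, findRev, ht, hr, Option.or]
    · have step : scanA (k :: rest) i s =
          scanA rest (i + 1) (if pvIsRev k then (match s with | none => some i | some _ => s) else s) := by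
        simp [scanA, ht]
      rw [step, ih]
      cases hft : findTotal rest with
      | none =>
        by_cases hr : pvIsRev k <;> cases s <;>
            simp only [findTotal, findRev, ht, hr, hft, Option.or, Option.map_map,
              if_true, if_false, Bool.false_eq_true, ite_false, ite_true] <;>
          cases hfr : findRev rest <;>
            simp [Option.or, hfr] <;> omega
      | some e =>
        by_cases hr : pvIsRev k <;> cases s <;>
            simp only [findTotal, findRev, List.take_succ_cons, ht, hr, hft, Option.or,
              Option.map_map] <;>
          cases hfr : findRev (rest.take (e + 1)) <;>
            simp [Option.or, hfr] <;> omega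

-- B's streaming loop, characterised by the same two first-match indices
theorem goB_eq (orig : List (String × String)) (l : List (String × String)) :
    ∀ (acc : Option (List (String × String))),
    goB orig l acc =
      match findTotal (l.map Prod.fst) with
      | none => orig
      | some e =>
        match acc with
        | some b => b ++ l.take (e + 1)
        | none =>
          match findRev ((l.map Prod.fst).take (e + 1)) with
          | none => orig
          | some s => (l.drop s).take (e + 1 - s) := by
  induction l with
  | nil => intro acc; cases acc <;> simp [goB, findTotal]
  | cons p rest ih =>
    intro acc
    obtain ⟨k, v⟩ := p
    by_cases ht : pvIsTotal k
    · by_cases hr : pvIsRev k <;> cases acc <;>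
        simp [goB, findTotal, findRev, ht, hr]
    · have step : goB orig ((k, v) :: rest) acc =
          goB orig rest ((if acc.isNone && pvIsRev k then some [] else acc).map (· ++ [(k, v)])) := by
        simp [goB, ht]
      rw [step, ih]
      cases hft : findTotal (rest.map Prod.fst) with
      | none =>
        by_cases hr : pvIsRev k <;> cases acc <;>
          simp [findTotal, ht, hr, hft]
      | some e =>
        by_cases hr : pvIsRev k <;> cases acc <;>
            simp only [findTotal, findRev, List.map_cons, List.take_succ_cons, ht, hr, hft,
              Option.isNone_none, Option.isNone_some, Option.map_some,
              Bool.and_true, Bool.and_false, if_true, if_false, Bool.false_eq_true] <;>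
          cases hfr : findRev ((rest.map Prod.fst).take (e + 1)) <;>
            simp [hfr, List.append_assoc]

-- first binding of a key present in a nodup association list is its value
theorem pvLookup_mem (l : List (String × String)) (k v : String)
    (hnd : (l.map Prod.fst).Nodup) (h : (k, v) ∈ l) : pvLookup l k = v :=
  PySem.Dict.getD_of_mem_items (d := PySem.Dict.mk l) h
    (by simpa [PySem.Dict.keys] using hnd) ""

-- ===== VERDICT (by name: the statement is the Claim_ definition above) =====
theorem filter_income_statement_block_spec : Claim_equal_filter_income_statement_block := by
  intro l _ hpre
  unfold Spec_filter_income_statement_block filter_income_statement_block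
    filter_income_statement_block_alt
  rw [goB_eq]
  simp only [scanA_eq]
  cases hft : findTotal (l.map Prod.fst) with
  | none => simp
  | some e =>
    cases hfr : findRev ((l.map Prod.fst).take (e + 1)) with
    | none => simp [hfr, Option.or]
    | some s =>
      simp only [hfr, Option.or, Option.map_some, Nat.add_zero]
      rw [← List.map_drop, ← List.map_take, List.map_map]
      have hid : ∀ p ∈ (l.drop s).take (e + 1 - s),
          ((fun k => (k, pvLookup l k)) ∘ Prod.fst) p = id p := by
        intro p hp
        obtain ⟨k, v⟩ := p
        have hmem : (k, v) ∈ l := List.mem_of_mem_drop (List.mem_of_mem_take hp)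
        simp [pvLookup_mem l k v hpre hmem]
      rw [List.map_congr_left hid, List.map_id]
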